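-- pv_equiv track=rewrite | github.com/Giovannibriglia/VectorizedBayesianNetwork | benchmarking/02_query_generation/bnlearn.py | _ancestors_descendants
-- ===== SOURCE A (Python) =====
-- from typing import Dict, Iterable, List, Set, Tuple
--
-- def _ancestors_descendants(
--     nodes: List[str],
--     parents: Dict[str, Set[str]],
--     children: Dict[str, Set[str]],
-- ) -> tuple[Dict[str, Set[str]], Dict[str, Set[str]]]:
--     ancestors: Dict[str, Set[str]] = {}
--     descendants: Dict[str, Set[str]] = {}
--
--     for node in nodes:
--         anc: Set[str] = set()
--         stack = list(sorted(parents.get(node, set())))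
--         while stack:
--             v = stack.pop()
--             if v in anc:
--                 continue
--             anc.add(v)
--             stack.extend(sorted(parents.get(v, set())))
--         ancestors[node] = anc
--
--         desc: Set[str] = set()
--         stack = list(sorted(children.get(node, set())))
--         while stack:
--             v = stack.pop()
--             if v in desc:
--                 continue
--             desc.add(v)
--             stack.extend(sorted(children.get(v, set())))
--         descendants[node] = desc
--
--     return ancestors, descendants
-- ===== SOURCE B (Python) =====
-- from typing import Dict, List, Set, Tuple
--
--
-- def _reach(start: str, adj: Dict[str, Set[str]]) -> Set[str]:
--     """Nodes reachable from start via adj, by one recursive DFS."""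
--     seen: Set[str] = set()
--
--     def visit(v: str) -> None:
--         for w in reversed(sorted(adj.get(v, ()))):
--             if w not in seen:
--                 seen.add(w)
--                 visit(w)
--
--     visit(start)
--     return seen
--
--
-- def _ancestors_descendants(
--     nodes: List[str],
--     parents: Dict[str, Set[str]],
--     children: Dict[str, Set[str]],
-- ) -> tuple[Dict[str, Set[str]], Dict[str, Set[str]]]:
--     ancestors = {node: _reach(node, parents) for node in nodes}
--     descendants = {node: _reach(node, children) for node in nodes}
--     return ancestors, descendants
-- ===== Notes on version B (the rewrite author's own statement) =====
-- stated objective: alternative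
-- what changed: One shared recursive DFS helper (visit a neighbour, recurse, then continue with the remaining siblings) replaces A's two duplicated explicit-stack while-loops with pop/extend and deferred visited checks.
import Mathlib
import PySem

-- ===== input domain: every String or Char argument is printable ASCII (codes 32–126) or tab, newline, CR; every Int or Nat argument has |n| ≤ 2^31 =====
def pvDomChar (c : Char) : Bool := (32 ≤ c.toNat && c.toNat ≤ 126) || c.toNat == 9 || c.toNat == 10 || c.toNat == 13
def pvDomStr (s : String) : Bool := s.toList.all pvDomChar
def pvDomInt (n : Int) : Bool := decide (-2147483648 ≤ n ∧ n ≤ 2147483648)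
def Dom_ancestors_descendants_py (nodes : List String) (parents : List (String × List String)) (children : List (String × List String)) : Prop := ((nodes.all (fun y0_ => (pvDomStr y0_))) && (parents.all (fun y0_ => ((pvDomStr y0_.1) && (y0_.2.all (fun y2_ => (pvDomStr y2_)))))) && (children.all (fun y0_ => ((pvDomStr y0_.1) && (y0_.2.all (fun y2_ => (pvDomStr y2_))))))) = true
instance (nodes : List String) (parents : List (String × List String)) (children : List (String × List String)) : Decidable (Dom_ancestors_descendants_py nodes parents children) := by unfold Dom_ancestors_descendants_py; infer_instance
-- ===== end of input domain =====

-- B replaces A's two duplicated explicit-stack while-loops by one recursive DFS helper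
-- (same asymptotic cost; objective: alternative decomposition). Return values agree exactly.

-- ===== PORT A =====
-- shared helpers: dict lookup with default, the pushed-neighbour list, and the
-- termination scaffolding (pvCands / pvNew and the three lemmas the ports cite
-- by name in their decreasing_by / membership-proof arguments).

-- parents.get(v, set()) — first-match association-list lookup, [] when absent
def pvGetD (adj : List (String × List String)) (v : String) : List String :=
  (PySem.Dict.mk adj).getD v []

-- sorted(adj.get(v, set())), reversed: the block of items Python pushes, listed in
-- the order they will be popped (the Lean stack keeps the TOP at the list HEAD, so
-- Python's 'stack.extend(sorted(...))' + 'stack.pop()' = prepending this list).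
def pvNbrs (adj : List (String × List String)) (v : String) : List String :=
  (PySem.List.sorted (pvGetD adj v) (fun x => x) false).reverse

-- every string that can ever be pushed (all dict values); used only for termination
def pvCands (adj : List (String × List String)) : List String :=
  (adj.map (fun p => p.2)).flatten

-- number of candidates not yet in `seen` — the decreasing measure
def pvNew (cands : List String) (seen : PySem.Set String) : Nat :=
  cands.countP (fun x => !(seen.contains x))

theorem pvContains_add_of_contains {seen : PySem.Set String} {x y : String}
    (h : seen.contains y = true) : (seen.add x).contains y = true := by
  simp [PySem.Set.add, PySem.Set.contains] at *
  split <;> simp [h]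

theorem pvNew_add_le (cands : List String) (seen : PySem.Set String) (x : String) :
    pvNew cands (seen.add x) ≤ pvNew cands seen := by
  unfold pvNew
  apply List.countP_mono_left
  intro a _ ha
  simp only [Bool.not_eq_true'] at *
  by_contra hc
  simp only [Bool.not_eq_false] at hc
  rw [pvContains_add_of_contains hc] at ha
  exact absurd ha (by simp)

theorem pvNew_add_lt (cands : List String) (seen : PySem.Set String) (x : String)
    (hx : x ∈ cands) (hc : seen.contains x = false) :
    pvNew cands (seen.add x) < pvNew cands seen := by
  induction cands with
  | nil => cases hx
  | cons c t ih =>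
    rw [pvNew, pvNew, List.countP_cons, List.countP_cons]
    rcases List.mem_cons.1 hx with rfl | hxt
    · have h1 : (!(seen.add x).contains x) = false := by
        simp [PySem.Set.contains, PySem.Set.mem_add]
      have hcx : (!seen.contains x) = true := by rw [hc]; rfl
      have h2 : pvNew t (seen.add x) ≤ pvNew t seen := pvNew_add_le t seen x
      simp only [pvNew] at h2
      rw [h1, hcx]
      simp only [Bool.false_eq_true, if_false, if_true]
      omega
    · have := ih hxt
      simp only [pvNew] at this
      have hmono : (!(seen.add x).contains c) = true → (!seen.contains c) = true := by
        intro h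
        simp only [Bool.not_eq_true'] at *
        by_contra hcc
        simp only [Bool.not_eq_false] at hcc
        rw [pvContains_add_of_contains hcc] at h
        exact absurd h (by simp)
      cases hA : (!(seen.add x).contains c) <;> cases hB : (!seen.contains c) <;>
        simp_all <;> omega

theorem pvNbrs_sub (adj : List (String × List String)) (v : String) :
    ∀ x ∈ pvNbrs adj v, x ∈ pvCands adj := by
  intro x hx
  simp only [pvNbrs, List.mem_reverse, PySem.List.mem_sorted] at hx
  simp only [pvCands, List.mem_flatten]
  unfold pvGetD at hx
  induction adj with
  | nil => simp [PySem.Dict.getD, PySem.Dict.get?] at hx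
  | cons p rest ih =>
    rw [PySem.Dict.getD] at hx
    rw [PySem.Dict.get?_mk_cons] at hx
    by_cases hk : p.1 == v
    · simp [hk] at hx
      exact ⟨p.2, by simp, hx⟩
    · simp [hk] at hx
      rcases ih (by rwa [PySem.Dict.getD]) with ⟨l, hl, hxl⟩
      exact ⟨l, by simp at hl ⊢; tauto, hxl⟩

-- A's inner 'while stack: v = stack.pop(); if v in seen: continue; seen.add(v);
-- stack.extend(sorted(adj.get(v, set())))' loop. The h argument is proof-only
-- (all stack items are candidates), used for termination; it is erased at runtime.
def pvStackLoop (adj : List (String × List String)) (seen : PySem.Set String)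
    (stack : List String) (h : ∀ x ∈ stack, x ∈ pvCands adj) : PySem.Set String :=
  match stack, h with
  | [], _ => seen
  | v :: rest, h =>
    if hc : seen.contains v = true then
      pvStackLoop adj seen rest (fun x hx => h x (List.mem_cons_of_mem _ hx))
    else
      pvStackLoop adj (seen.add v) (pvNbrs adj v ++ rest)
        (fun x hx => (List.mem_append.1 hx).elim (pvNbrs_sub adj v x)
          (fun h2 => h x (List.mem_cons_of_mem _ h2)))
termination_by (pvNew (pvCands adj) seen, stack.length)
decreasing_by
  · exact Prod.Lex.right _ (Nat.lt_succ_self _)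
  · exact Prod.Lex.left _ _
      (pvNew_add_lt _ _ _ (h v (List.mem_cons_self)) (Bool.not_eq_true _ ▸ (by simpa using hc)))

def ancestors_descendants_py (nodes : List String) (parents : List (String × List String))
    (children : List (String × List String)) :
    (List (String × List String)) × (List (String × List String)) :=
  let res := nodes.foldl
    (fun (ad : PySem.Dict String (List String) × PySem.Dict String (List String)) node =>
      let anc := pvStackLoop parents PySem.Set.empty (pvNbrs parents node) (pvNbrs_sub parents node)
      let desc := pvStackLoop children PySem.Set.empty (pvNbrs children node) (pvNbrs_sub children node)
      (ad.1.insert node anc, ad.2.insert node desc))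
    (PySem.Dict.empty, PySem.Dict.empty)
  (res.1.items, res.2.items)

-- ===== PORT B =====
-- Source B's recursive 'visit': for w in reversed(sorted(adj.get(v, ()))): if w not in
-- seen: seen.add(w); visit(w). The list argument is the pending iteration of one
-- 'for' frame; the subtype bound on the result and the h argument are proof-only
-- termination scaffolding and are erased at runtime.
def pvVisit (adj : List (String × List String)) (seen : PySem.Set String)
    (todo : List String) (h : ∀ x ∈ todo, x ∈ pvCands adj) :
    {s : PySem.Set String // pvNew (pvCands adj) s ≤ pvNew (pvCands adj) seen} :=
  match todo, h with
  | [], _ => ⟨seen, Nat.le_refl _⟩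
  | w :: ws, h =>
    if hc : seen.contains w = true then
      pvVisit adj seen ws (fun x hx => h x (List.mem_cons_of_mem _ hx))
    else
      let inner := pvVisit adj (seen.add w) (pvNbrs adj w) (pvNbrs_sub adj w)
      let outer := pvVisit adj inner.1 ws (fun x hx => h x (List.mem_cons_of_mem _ hx))
      ⟨outer.1, Nat.le_trans outer.2 (Nat.le_trans inner.2 (pvNew_add_le _ _ _))⟩
termination_by (pvNew (pvCands adj) seen, todo.length)
decreasing_by
  · exact Prod.Lex.right _ (Nat.lt_succ_self _)
  · exact Prod.Lex.left _ _
      (pvNew_add_lt _ _ _ (h w (List.mem_cons_self)) (by simpa using hc))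
  · exact Prod.Lex.left _ _
      (Nat.lt_of_le_of_lt inner.2
        (pvNew_add_lt _ _ _ (h w (List.mem_cons_self)) (by simpa using hc)))

-- Source B's _reach(start, adj): seen = set(); visit(start); return seen
def pvReach (adj : List (String × List String)) (start : String) : PySem.Set String :=
  (pvVisit adj PySem.Set.empty (pvNbrs adj start) (pvNbrs_sub adj start)).1

def ancestors_descendants_py_alt (nodes : List String) (parents : List (String × List String))
    (children : List (String × List String)) :
    (List (String × List String)) × (List (String × List String)) :=
  ((nodes.foldl (fun d node => d.insert node (pvReach parents node))
      (PySem.Dict.empty : PySem.Dict String (List String))).items,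
   (nodes.foldl (fun d node => d.insert node (pvReach children node))
      (PySem.Dict.empty : PySem.Dict String (List String))).items)

-- ===== PRECONDITION & SPEC =====
def Spec_ancestors_descendants_py (nodes : List String) (parents : List (String × List String)) (children : List (String × List String)) (out : (List (String × List String)) × (List (String × List String))) : Prop := out = ancestors_descendants_py_alt nodes parents children
instance (nodes : List String) (parents : List (String × List String)) (children : List (String × List String)) (out : (List (String × List String)) × (List (String × List String))) : Decidable (Spec_ancestors_descendants_py nodes parents children out) := by unfold Spec_ancestors_descendants_py; infer_instance

-- ===== CLAIM (what is proved, stated in full; the proofs are below) =====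
def Claim_equal_ancestors_descendants_py : Prop := ∀ (nodes : List String) (parents : List (String × List String)) (children : List (String × List String)), Dom_ancestors_descendants_py nodes parents children → Spec_ancestors_descendants_py nodes parents children (ancestors_descendants_py nodes parents children)

-- ===== LEMMAS AND PROOFS =====

-- unfolding equations of the two well-founded recursions (the h argument of the
-- rewritten call is universally quantified; any proof works by proof irrelevance)
theorem pvStackLoop_nil (adj : List (String × List String)) (seen : PySem.Set String)
    (h : ∀ x ∈ ([] : List String), x ∈ pvCands adj) : pvStackLoop adj seen [] h = seen := by
  rw [pvStackLoop]

theorem pvStackLoop_cons_mem (adj : List (String × List String)) (seen : PySem.Set String)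
    (v : String) (rest : List String) (h h') (hc : seen.contains v = true) :
    pvStackLoop adj seen (v :: rest) h = pvStackLoop adj seen rest h' := by
  rw [pvStackLoop]
  simp only [hc, dif_pos]

theorem pvStackLoop_cons_new (adj : List (String × List String)) (seen : PySem.Set String)
    (v : String) (rest : List String) (h h') (hc : seen.contains v = false) :
    pvStackLoop adj seen (v :: rest) h = pvStackLoop adj (seen.add v) (pvNbrs adj v ++ rest) h' := by
  rw [pvStackLoop]
  rw [dif_neg (by simp only [hc, Bool.false_eq_true, not_false_eq_true])]

theorem pvVisit_nil (adj : List (String × List String)) (seen : PySem.Set String)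
    (h : ∀ x ∈ ([] : List String), x ∈ pvCands adj) : (pvVisit adj seen [] h).1 = seen := by
  rw [pvVisit]

theorem pvVisit_cons_mem (adj : List (String × List String)) (seen : PySem.Set String)
    (w : String) (ws : List String) (h h') (hc : seen.contains w = true) :
    (pvVisit adj seen (w :: ws) h).1 = (pvVisit adj seen ws h').1 := by
  rw [pvVisit]
  simp only [hc, dif_pos]

theorem pvVisit_cons_new (adj : List (String × List String)) (seen : PySem.Set String)
    (w : String) (ws : List String) (h h') (hc : seen.contains w = false) :
    (pvVisit adj seen (w :: ws) h).1 =
      (pvVisit adj (pvVisit adj (seen.add w) (pvNbrs adj w) (pvNbrs_sub adj w)).1 ws h').1 := by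
  rw [pvVisit]
  rw [dif_neg (by simp only [hc, Bool.false_eq_true, not_false_eq_true])]

theorem pvStackLoop_congr (adj : List (String × List String)) (seen : PySem.Set String)
    {s1 s2 : List String} (hl : s1 = s2) (h1 h2) :
    pvStackLoop adj seen s1 h1 = pvStackLoop adj seen s2 h2 := by subst hl; rfl

-- the stack loop processes a concatenated stack segment by segment
theorem pvStack_append (adj : List (String × List String)) :
    ∀ N : Nat, ∀ seen : PySem.Set String, pvNew (pvCands adj) seen ≤ N →
    ∀ (l1 l2 : List String) (h12 : ∀ x ∈ l1 ++ l2, x ∈ pvCands adj)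
      (h1 : ∀ x ∈ l1, x ∈ pvCands adj) (h2 : ∀ x ∈ l2, x ∈ pvCands adj),
    pvStackLoop adj seen (l1 ++ l2) h12 =
      pvStackLoop adj (pvStackLoop adj seen l1 h1) l2 h2 := by
  intro N
  induction N using Nat.strong_induction_on with
  | _ N ih =>
    intro seen hN l1
    induction l1 with
    | nil =>
      intro l2 h12 h1 h2
      rw [pvStackLoop_congr adj seen (show ([] : List String) ++ l2 = l2 from rfl) h12 h2, pvStackLoop_nil]
    | cons v r ihl =>
      intro l2 h12 h1 h2
      rw [pvStackLoop_congr adj seen (show (v :: r) ++ l2 = v :: (r ++ l2) from rfl) h12 h12]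
      cases hc : seen.contains v with
      | true =>
        rw [pvStackLoop_cons_mem adj seen v (r ++ l2) h12
          (fun x hx => h12 x (List.mem_cons_of_mem v hx)) hc]
        rw [pvStackLoop_cons_mem adj seen v r h1
          (fun x hx => h1 x (List.mem_cons_of_mem v hx)) hc]
        exact ihl l2 _ _ h2
      | false =>
        have hvc : v ∈ pvCands adj := h1 v List.mem_cons_self
        have hlt : pvNew (pvCands adj) (seen.add v) < pvNew (pvCands adj) seen :=
          pvNew_add_lt _ _ _ hvc hc
        rw [pvStackLoop_cons_new adj seen v (r ++ l2) h12
          (fun x hx => (List.mem_append.1 hx).elim (pvNbrs_sub adj v x)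
            (fun hh => h12 x (List.mem_cons_of_mem v hh))) hc]
        rw [pvStackLoop_cons_new adj seen v r h1
          (fun x hx => (List.mem_append.1 hx).elim (pvNbrs_sub adj v x)
            (fun hh => h1 x (List.mem_cons_of_mem v hh))) hc]
        rw [pvStackLoop_congr adj (seen.add v)
          (List.append_assoc (pvNbrs adj v) r l2).symm _
          (fun x hx => (List.mem_append.1 hx).elim
            (fun hh => (List.mem_append.1 hh).elim (pvNbrs_sub adj v x)
              (fun hh' => h12 x (List.mem_cons_of_mem v (List.mem_append_left l2 hh'))))
            (h2 x))]
        exact ih (pvNew (pvCands adj) (seen.add v)) (Nat.lt_of_lt_of_le hlt hN)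
          (seen.add v) (Nat.le_refl _) _ l2 _ _ h2

-- B's recursive DFS and A's explicit stack visit the same nodes in the same order
theorem pvVisit_eq_stack (adj : List (String × List String)) :
    ∀ N : Nat, ∀ seen : PySem.Set String, pvNew (pvCands adj) seen ≤ N →
    ∀ (todo : List String) (h : ∀ x ∈ todo, x ∈ pvCands adj),
    (pvVisit adj seen todo h).1 = pvStackLoop adj seen todo h := by
  intro N
  induction N using Nat.strong_induction_on with
  | _ N ih =>
    intro seen hN todo
    induction todo with
    | nil =>
      intro h
      rw [pvVisit_nil, pvStackLoop_nil]
    | cons w ws ihl =>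
      intro h
      cases hc : seen.contains w with
      | true =>
        rw [pvVisit_cons_mem adj seen w ws h
          (fun x hx => h x (List.mem_cons_of_mem w hx)) hc]
        rw [pvStackLoop_cons_mem adj seen w ws h
          (fun x hx => h x (List.mem_cons_of_mem w hx)) hc]
        exact ihl _
      | false =>
        have hwc : w ∈ pvCands adj := h w List.mem_cons_self
        have hlt : pvNew (pvCands adj) (seen.add w) < pvNew (pvCands adj) seen :=
          pvNew_add_lt _ _ _ hwc hc
        rw [pvVisit_cons_new adj seen w ws h
          (fun x hx => h x (List.mem_cons_of_mem w hx)) hc]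
        have e1 : (pvVisit adj (seen.add w) (pvNbrs adj w) (pvNbrs_sub adj w)).1 =
            pvStackLoop adj (seen.add w) (pvNbrs adj w) (pvNbrs_sub adj w) :=
          ih (pvNew (pvCands adj) (seen.add w)) (Nat.lt_of_lt_of_le hlt hN)
            (seen.add w) (Nat.le_refl _) _ _
        have hb := (pvVisit adj (seen.add w) (pvNbrs adj w) (pvNbrs_sub adj w)).2
        rw [e1] at hb
        rw [e1]
        have e2 : (pvVisit adj (pvStackLoop adj (seen.add w) (pvNbrs adj w) (pvNbrs_sub adj w)) ws
            (fun x hx => h x (List.mem_cons_of_mem w hx))).1 =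
            pvStackLoop adj (pvStackLoop adj (seen.add w) (pvNbrs adj w) (pvNbrs_sub adj w)) ws
            (fun x hx => h x (List.mem_cons_of_mem w hx)) :=
          ih (pvNew (pvCands adj) (seen.add w)) (Nat.lt_of_lt_of_le hlt hN) _ hb _ _
        rw [e2]
        rw [pvStackLoop_cons_new adj seen w ws h
          (fun x hx => (List.mem_append.1 hx).elim (pvNbrs_sub adj w x)
            (fun hh => h x (List.mem_cons_of_mem w hh))) hc]
        exact (pvStack_append adj (pvNew (pvCands adj) (seen.add w)) (seen.add w)
          (Nat.le_refl _) (pvNbrs adj w) ws _ (pvNbrs_sub adj w)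
          (fun x hx => h x (List.mem_cons_of_mem w hx))).symm

theorem pvReach_eq (adj : List (String × List String)) (start : String) :
    pvReach adj start =
      pvStackLoop adj PySem.Set.empty (pvNbrs adj start) (pvNbrs_sub adj start) :=
  pvVisit_eq_stack adj (pvNew (pvCands adj) PySem.Set.empty) PySem.Set.empty
    (Nat.le_refl _) _ _

-- ===== VERDICT (by name: the statement is the Claim_ definition above) =====
theorem ancestors_descendants_py_spec : Claim_equal_ancestors_descendants_py := by
  intro nodes parents children _
  unfold Spec_ancestors_descendants_py
  simp only [ancestors_descendants_py, ancestors_descendants_py_alt, pvReach_eq]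
  rw [PySem.List.foldl_prod_mk
    (fun (d : PySem.Dict String (List String)) node =>
      d.insert node (pvStackLoop parents PySem.Set.empty (pvNbrs parents node) (pvNbrs_sub parents node)))
    (fun (d : PySem.Dict String (List String)) node =>
      d.insert node (pvStackLoop children PySem.Set.empty (pvNbrs children node) (pvNbrs_sub children node)))
    nodes PySem.Dict.empty PySem.Dict.empty]
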